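-- pv_equiv track=rewrite | github.com/nchorro/codigos_de_python_tfg_noelia_chorro | aplicacion_con_algebra_lineal.py | desentrelazado
-- ===== SOURCE A (Python) =====
-- def desentrelazado(bloques):
--     e = []
--     for k in range(len(bloques)):
--         for j in range(len(bloques[0])):
--             e.append(bloques[k][j])
--     ent = []
--     for t in range(0, len(bloques)):
--         x = []
--         for s in range(0, len(bloques[0])):
--             x.append(e[t + s*len(bloques)])
--         ent.append(x)
--     return ent
-- ===== SOURCE B (Python) =====
-- def desentrelazado(bloques):
--     rows = len(bloques)
--     if rows == 0:
--         return []
--     cols = len(bloques[0])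
--     return [[bloques[(t + s * rows) // cols][(t + s * rows) % cols]
--              for s in range(cols)]
--             for t in range(rows)]
-- ===== Notes on version B (the rewrite author's own statement) =====
-- stated objective: simpler
-- what changed: A flattens all blocks row-major into an intermediate list e and then re-reads it at index t+s*rows; B drops the intermediate list entirely and reads each output element ent[t][s] directly from bloques via index arithmetic ((t+s*rows)//cols, (t+s*rows)%cols).
import Mathlib
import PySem

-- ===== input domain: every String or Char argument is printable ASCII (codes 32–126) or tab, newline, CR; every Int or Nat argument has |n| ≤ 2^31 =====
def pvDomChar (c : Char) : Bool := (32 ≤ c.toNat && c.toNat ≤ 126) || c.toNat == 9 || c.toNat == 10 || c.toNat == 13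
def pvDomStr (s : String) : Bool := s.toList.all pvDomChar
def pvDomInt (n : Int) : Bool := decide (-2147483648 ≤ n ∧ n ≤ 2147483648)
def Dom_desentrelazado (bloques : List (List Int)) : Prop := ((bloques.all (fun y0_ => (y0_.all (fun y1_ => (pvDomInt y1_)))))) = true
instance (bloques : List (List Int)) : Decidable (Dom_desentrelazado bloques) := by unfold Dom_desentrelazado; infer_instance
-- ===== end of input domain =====

-- B replaces A's flatten-then-reindex with a single computed pass: ent[t][s] is read
-- directly from bloques via index arithmetic ((t+s*rows)//cols, %cols); objective: simpler.
-- ===== PORT A =====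
def desentrelazado (bloques : List (List Int)) : List (List Int) :=
  let e : List Int :=
    (PySem.List.pyRange 0 (bloques.length : Int) 1).foldl
      (fun acc k =>
        (PySem.List.pyRange 0 ((PySem.List.pyGetD bloques 0 []).length : Int) 1).foldl
          (fun acc2 j => acc2 ++ [PySem.List.pyGetD (PySem.List.pyGetD bloques k []) j 0]) acc) []
  (PySem.List.pyRange 0 (bloques.length : Int) 1).foldl
    (fun ent t =>
      ent ++ [(PySem.List.pyRange 0 ((PySem.List.pyGetD bloques 0 []).length : Int) 1).foldl
        (fun x s => x ++ [PySem.List.pyGetD e (t + s * (bloques.length : Int)) 0]) []]) []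

-- ===== PORT B =====
-- Python's // and % are applied only to nonnegative operands here (t + s*rows ≥ 0, cols > 0
-- whenever the inner comprehension is nonempty), where they coincide with Nat division/mod.
def desentrelazado_alt (bloques : List (List Int)) : List (List Int) :=
  let rows := bloques.length
  if rows = 0 then []
  else
    let cols := (bloques.headD []).length
    (List.range rows).map (fun t =>
      (List.range cols).map (fun s =>
        (bloques.getD ((t + s * rows) / cols) []).getD ((t + s * rows) % cols) 0))

-- ===== PRECONDITION & SPEC =====
-- Pre_ excludes exactly the ragged inputs on which Python A raises IndexError while
-- flattening: some row shorter than the first row.  (Python B raises there too.)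
def Pre_desentrelazado (bloques : List (List Int)) : Prop :=
  ∀ r ∈ bloques, (bloques.headD []).length ≤ r.length
instance (bloques : List (List Int)) : Decidable (Pre_desentrelazado bloques) := by
  unfold Pre_desentrelazado; infer_instance
def pvWitness_desentrelazado : List (List Int) := [[1, 2, 3], [4, 5, 6]]
def Spec_desentrelazado (bloques : List (List Int)) (out : List (List Int)) : Prop := out = desentrelazado_alt bloques
instance (bloques : List (List Int)) (out : List (List Int)) : Decidable (Spec_desentrelazado bloques out) := by unfold Spec_desentrelazado; infer_instance

-- ===== CLAIM (what is proved, stated in full; the proofs are below) =====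
def Claim_equal_desentrelazado : Prop := ∀ (bloques : List (List Int)), Dom_desentrelazado bloques → Pre_desentrelazado bloques → Spec_desentrelazado bloques (desentrelazado bloques)

-- ===== LEMMAS AND PROOFS =====

-- Indexing the row-major flatten (cols getD-reads from each row) at q is reading
-- block q / cols at offset q % cols.
lemma flat_get (cols : Nat) (bs : List (List Int)) (q : Nat) (hq : q < bs.length * cols) :
    (bs.flatMap (fun r => (List.range cols).map (fun j => r.getD j 0))).getD q 0
      = (bs.getD (q / cols) []).getD (q % cols) 0 := by
  induction bs generalizing q with
  | nil => simp at hq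
  | cons r rest ih =>
    have hcols : 0 < cols := by
      rcases Nat.eq_zero_or_pos cols with h | h
      · simp [h] at hq
      · exact h
    rw [List.flatMap_cons]
    by_cases hlt : q < cols
    · rw [List.getD_append _ _ _ _ (by simpa using hlt)]
      rw [Nat.div_eq_of_lt hlt, Nat.mod_eq_of_lt hlt]
      simp [List.getD_eq_getElem?_getD, hlt]
    · have hge : cols ≤ q := Nat.le_of_not_lt hlt
      rw [List.getD_append_right _ _ _ _ (by simpa using hge)]
      have hlen : ((List.range cols).map (fun j => r.getD j 0)).length = cols := by simp
      rw [hlen]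
      have h1 : q / cols = (q - cols) / cols + 1 := by
        rw [Nat.div_eq_sub_div hcols hge]
      have h2 : q % cols = (q - cols) % cols := by
        conv_lhs => rw [← Nat.sub_add_cancel hge]
        rw [Nat.add_mod_right]
      rw [h1, h2]
      have hq' : q - cols < rest.length * cols := by
        have h3 : (r :: rest).length * cols = rest.length * cols + cols := by
          simp [Nat.succ_mul]
        omega
      have := ih (q - cols) hq'
      simpa using this

lemma foldl_append_flat {α β : Type} (f : α → List β) (l : List α) (init : List β) :
    l.foldl (fun acc x => acc ++ f x) init = init ++ l.flatMap f := by
  induction l generalizing init with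
  | nil => simp
  | cons a t ih => simp [List.foldl_cons, ih]

lemma map_range_getD {α β : Type} (xs : List α) (d : α) (f : α → β) :
    (List.range xs.length).map (fun k => f (xs.getD k d)) = xs.map f := by
  apply List.ext_getElem
  · simp
  · intro i h1 h2
    simp [List.getD_eq_getElem?_getD, (by simpa using h1 : i < xs.length)]

lemma range_flatMap {α β : Type} (xs : List α) (d : α) (f : α → List β) :
    (List.range xs.length).flatMap (fun k => f (xs.getD k d)) = xs.flatMap f := by
  rw [List.flatMap_def, map_range_getD, ← List.flatMap_def]

-- ===== VERDICT (by name: the statement is the Claim_ definition above) =====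
theorem desentrelazado_spec : Claim_equal_desentrelazado := by
  intro bloques _ hpre
  unfold Spec_desentrelazado
  clear hpre
  match bloques with
  | [] => rfl
  | r0 :: rest =>
    set bl := r0 :: rest with hbl
    set rows := bl.length with hrows
    set cols := r0.length with hcols
    have hget0 : PySem.List.pyGetD bl 0 [] = r0 := by simp [hbl, PySem.List.pyGetD]
    have hne : rows ≠ 0 := by simp [hrows, hbl]
    simp only [desentrelazado, desentrelazado_alt, hget0]
    rw [if_neg hne]
    simp only [PySem.List.foldl_append_singleton_eq_map, List.nil_append]
    rw [foldl_append_flat]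
    simp only [PySem.List.pyRange_zero_natCast, List.map_map, List.flatMap_map, List.nil_append]
    simp only [Function.comp_def, PySem.List.pyGetD_natCast]
    apply List.map_congr_left
    intro t ht
    apply List.map_congr_left
    intro s hs
    rw [List.mem_range] at ht hs
    have hq : t + s * bl.length < bl.length * cols := by
      have h1 : t + s * bl.length < (s + 1) * bl.length := by
        rw [Nat.succ_mul]; omega
      have h2 : (s + 1) * bl.length ≤ cols * bl.length := Nat.mul_le_mul_right _ hs
      calc t + s * bl.length < (s + 1) * bl.length := h1
        _ ≤ cols * bl.length := h2
        _ = bl.length * cols := Nat.mul_comm _ _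
    have hcast : ((t : Int) + (s : Int) * (bl.length : Int)) = ((t + s * bl.length : Nat) : Int) := by
      push_cast; ring
    rw [hcast, PySem.List.pyGetD_natCast]
    rw [range_flatMap bl [] (fun r => (List.range cols).map (fun k => r.getD k 0))]
    exact flat_get cols bl _ hq
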